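-- pv_equiv track=rewrite | github.com/trilogy-group/swagger-django-generator | swagger_django_generator/generator.py | path_to_class_name
-- ===== SOURCE A (Python) =====
-- ROOT_CLASS_NAME = u"Root"
--
-- def path_to_class_name(path):
--     # type: (unicode) -> unicode
--     """
--     We map paths (typically only the relative part) to a canonical
--     class name. In the event that the path is "/", ROOT_CLASS_NAME will be
--     returned.
--     :param path: A path of the form "/some/path/{foo_id}/bar/{barId}/"
--     :return: A class name of the form "SomePathFooIdBarBarId"
--     """
--     character_map = {
--         ord("{"): None,
--         ord("}"): None,
--         ord("_"): u"/"
--     }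
--     sanitised = path.translate(character_map)
--     class_name = u"".join(
--         # Uppercase the first letter of each non-empty word, while
--         # preserving the case of the letters thereafter.
--         p[0].upper() + p[1:] for p in sanitised.split("/") if p
--     )
--     return class_name or ROOT_CLASS_NAME
-- ===== SOURCE B (Python) =====
-- ROOT_CLASS_NAME = u"Root"
--
-- def path_to_class_name(path):
--     """Single left-to-right character scan with a word_start flag instead of
--     translate + split + join."""
--     result = []
--     word_start = True
--     for c in path:
--         if c == "{" or c == "}":
--             continue
--         elif c == "/" or c == "_":
--             word_start = True
--         else:
--             result.append(c.upper() if word_start else c)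
--             word_start = False
--     return "".join(result) or ROOT_CLASS_NAME
-- ===== Notes on version B (the rewrite author's own statement) =====
-- stated objective: simpler
-- what changed: Replaces the translate/split/capitalize-join pipeline with a single character scan keeping a word_start flag: braces are skipped, slash and underscore set the flag, and each other character is emitted directly, uppercased at a word start.
import Mathlib
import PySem

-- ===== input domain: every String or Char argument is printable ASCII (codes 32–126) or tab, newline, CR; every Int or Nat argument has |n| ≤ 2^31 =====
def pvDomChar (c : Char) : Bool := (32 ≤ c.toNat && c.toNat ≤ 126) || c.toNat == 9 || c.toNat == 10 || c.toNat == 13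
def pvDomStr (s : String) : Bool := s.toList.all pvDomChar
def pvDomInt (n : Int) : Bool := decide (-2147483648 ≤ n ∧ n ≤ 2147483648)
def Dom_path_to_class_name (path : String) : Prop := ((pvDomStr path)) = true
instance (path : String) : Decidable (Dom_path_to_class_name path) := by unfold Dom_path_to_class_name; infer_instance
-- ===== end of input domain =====

-- B replaces A's translate/split/capitalize-join pipeline by one character scan with a
-- word_start flag (objective: simpler).

-- ===== PORT A =====
-- path.translate({ord('{'):None, ord('}'):None, ord('_'):'/'}): each char maps to [] / ['/'] / itself
def pvTranslateA (c : Char) : List Char :=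
  if c = '{' ∨ c = '}' then [] else if c = '_' then ['/'] else [c]

-- p[0].upper() + p[1:] for a (nonempty) part p
def pvCapA (p : List Char) : List Char :=
  match p with
  | [] => []
  | h :: t => PySem.Chars.upperChar h :: t

def path_to_class_name (path : String) : String :=
  -- class_name or ROOT_CLASS_NAME
  if (PySem.Chars.join []
      (((PySem.Chars.splitOn ((path.toList.map pvTranslateA).flatten) ['/']).filter
          (fun p => p ≠ [])).map pvCapA)) = [] then "Root"
  else String.ofList
    (PySem.Chars.join []
      (((PySem.Chars.splitOn ((path.toList.map pvTranslateA).flatten) ['/']).filter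
          (fun p => p ≠ [])).map pvCapA))

-- ===== PORT B =====
def path_to_class_name_alt (path : String) : String :=
  -- ''.join(result) or ROOT_CLASS_NAME
  let result :=
    (path.toList.foldl
      (fun (st : List Char × Bool) c =>
        if c = '{' ∨ c = '}' then st
        else if c = '/' ∨ c = '_' then (st.1, true)
        else (st.1 ++ [if st.2 then PySem.Chars.upperChar c else c], false))
      ([], true)).1
  if result = [] then "Root" else String.ofList result

-- ===== PRECONDITION & SPEC =====
def Spec_path_to_class_name (path : String) (out : String) : Prop := out = path_to_class_name_alt path
instance (path : String) (out : String) : Decidable (Spec_path_to_class_name path out) := by unfold Spec_path_to_class_name; infer_instance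

-- ===== CLAIM (what is proved, stated in full; the proofs are below) =====
def Claim_equal_path_to_class_name : Prop := ∀ (path : String), Dom_path_to_class_name path → Spec_path_to_class_name path (path_to_class_name path)

-- ===== LEMMAS AND PROOFS =====

-- specification-side split on '/': splitSlash l is what l.split('/') returns
def splitSlash : List Char → List (List Char)
  | [] => [[]]
  | c :: r =>
    if c = '/' then [] :: splitSlash r
    else
      match splitSlash r with
      | [] => [[c]]          -- unreachable: splitSlash is never []
      | p :: ps => (c :: p) :: ps

theorem splitSlash_ne_nil (l : List Char) : splitSlash l ≠ [] := by
  cases l with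
  | nil => simp [splitSlash]
  | cons c r =>
    simp only [splitSlash]
    split
    · simp
    · split <;> simp

-- splitOn.go with enough fuel computes acc.reverse ++ (cur.reverse glued onto splitSlash l)
set_option maxRecDepth 2048 in
theorem go_eq_splitSlash (fuel : Nat) (l cur : List Char) (accs : List (List Char))
    (h : l.length ≤ fuel) :
    PySem.Chars.splitOn.go ['/'] fuel l cur accs =
      accs.reverse ++
        (match splitSlash l with
         | [] => [cur.reverse]
         | p :: ps => (cur.reverse ++ p) :: ps) := by
  induction fuel generalizing l cur accs with
  | zero =>
    have hl : l = [] := by cases l <;> simp_all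
    subst hl
    simp [PySem.Chars.splitOn.go, splitSlash]
  | succ fuel ih =>
    cases l with
    | nil => simp [PySem.Chars.splitOn.go, splitSlash]
    | cons c r =>
      simp only [PySem.Chars.splitOn.go]
      by_cases hc : c = '/'
      · subst hc
        rw [if_pos (by simp [List.isPrefixOf])]
        have hdrop : List.drop ['/'].length ('/' :: r) = r := by simp
        rw [hdrop, ih r [] _ (by simpa using Nat.le_of_succ_le_succ h)]
        have hss : splitSlash ('/' :: r) = [] :: splitSlash r := by
          simp [splitSlash]
        rw [hss]
        cases hps : splitSlash r with
        | nil => exact absurd hps (splitSlash_ne_nil r)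
        | cons p ps =>
          simp only [List.reverse_cons, List.reverse_nil, List.nil_append, List.append_nil,
            List.append_assoc, List.cons_append]
      · rw [if_neg (by simp [List.isPrefixOf, Ne.symm hc])]
        rw [ih r (c :: cur) _ (by simpa using Nat.le_of_succ_le_succ h)]
        cases hps : splitSlash r with
        | nil => exact absurd hps (splitSlash_ne_nil r)
        | cons p ps =>
          have hss : splitSlash (c :: r) = (c :: p) :: ps := by
            simp [splitSlash, hc, hps]
          rw [hss]; simp

theorem splitOn_eq_splitSlash (l : List Char) :
    PySem.Chars.splitOn l ['/'] = splitSlash l := by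
  unfold PySem.Chars.splitOn
  rw [go_eq_splitSlash _ _ _ [] (by omega)]
  cases hps : splitSlash l with
  | nil => exact absurd hps (splitSlash_ne_nil l)
  | cons p ps => simp

-- the capitalise-and-join of a part list, as A computes it after the split
def capJoin (ps : List (List Char)) : List Char :=
  ((ps.filter (fun p => p ≠ [])).map pvCapA).flatten

theorem capJoin_cons (p : List Char) (ps : List (List Char)) :
    capJoin (p :: ps) = pvCapA p ++ capJoin ps := by
  cases p <;> simp [capJoin, pvCapA]

-- the specification-side scan (B's loop, written as recursion over the sanitised chars)
def scanG : List Char → Bool → List Char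
  | [], _ => []
  | c :: r, ws =>
    if c = '/' then scanG r true
    else (if ws then PySem.Chars.upperChar c else c) :: scanG r false

-- core: capitalising the split parts of l is the scan of l, for both flag states
theorem capJoin_splitSlash (l : List Char) :
    (∀ p ps, splitSlash l = p :: ps → pvCapA p ++ capJoin ps = scanG l true ∧
      p ++ capJoin ps = scanG l false) := by
  induction l with
  | nil => intro p ps h; simp [splitSlash] at h; simp [h.1, h.2, pvCapA, capJoin, scanG]
  | cons c r ih =>
    intro p ps h
    by_cases hc : c = '/'
    · subst hc
      simp only [splitSlash] at h
      obtain ⟨hp, hps⟩ := List.cons.inj h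
      subst hp hps
      cases hps' : splitSlash r with
      | nil => exact absurd hps' (splitSlash_ne_nil r)
      | cons p' ps' =>
        have := (ih p' ps' hps').1
        rw [capJoin_cons]
        constructor <;> simpa [pvCapA, scanG]
    · simp only [splitSlash, if_neg hc] at h
      cases hps' : splitSlash r with
      | nil => exact absurd hps' (splitSlash_ne_nil r)
      | cons p' ps' =>
        rw [hps'] at h
        obtain ⟨hp, hps⟩ := List.cons.inj h
        subst hp hps
        have h2 := (ih p' ps' hps').2
        constructor <;> simp [pvCapA, scanG, hc, h2]

-- B's scan of the raw path equals the specification scan of A's translated string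
def scanB : List Char → Bool → List Char
  | [], _ => []
  | c :: r, ws =>
    if c = '{' ∨ c = '}' then scanB r ws
    else if c = '/' ∨ c = '_' then scanB r true
    else (if ws then PySem.Chars.upperChar c else c) :: scanB r false

theorem scanG_translate (l : List Char) (ws : Bool) :
    scanG (l.map pvTranslateA).flatten ws = scanB l ws := by
  induction l generalizing ws with
  | nil => simp [scanG, scanB]
  | cons c r ih =>
    simp only [List.map_cons, List.flatten_cons, scanB]
    by_cases h1 : c = '{' ∨ c = '}'
    · have hcc : pvTranslateA c = [] := by simp [pvTranslateA, h1]
      rw [hcc, if_pos h1]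
      simpa using ih ws
    · rw [if_neg h1]
      by_cases h2 : c = '/' ∨ c = '_'
      · have hcc : pvTranslateA c = ['/'] := by
          rcases h2 with h | h <;> simp [pvTranslateA, h]
        rw [hcc, if_pos h2]
        simpa [scanG] using ih true
      · have h3 : ¬ c = '/' := fun h => h2 (Or.inl h)
        have h4 : ¬ c = '_' := fun h => h2 (Or.inr h)
        have hcc : pvTranslateA c = [c] := by
          simp [pvTranslateA, h1, h4]
        rw [hcc, if_neg h2]
        simpa [scanG, h3] using ih false

-- B's foldl with its pair state, related to scanB
theorem foldl_scanB (l : List Char) (acc : List Char) (ws : Bool) :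
    (l.foldl
      (fun (st : List Char × Bool) c =>
        if c = '{' ∨ c = '}' then st
        else if c = '/' ∨ c = '_' then (st.1, true)
        else (st.1 ++ [if st.2 then PySem.Chars.upperChar c else c], false))
      (acc, ws)).1 = acc ++ scanB l ws := by
  induction l generalizing acc ws with
  | nil => simp [scanB]
  | cons c r ih =>
    simp only [List.foldl_cons]
    by_cases h1 : c = '{' ∨ c = '}'
    · simp [h1, scanB, ih]
    · by_cases h2 : c = '/' ∨ c = '_'
      · simp [h1, h2, scanB, ih]
      · simp [h1, h2, scanB, ih]

theorem join_nil_flatten (ps : List (List Char)) :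
    PySem.Chars.join [] ps = ps.flatten := by
  simp only [PySem.Chars.join, List.intercalate]
  induction ps with
  | nil => simp
  | cons p ps ih => cases ps <;> simp_all [List.intersperse]

theorem ports_agree (path : String) :
    path_to_class_name path = path_to_class_name_alt path := by
  unfold path_to_class_name path_to_class_name_alt
  rw [foldl_scanB _ [] true, join_nil_flatten]
  have hs := splitOn_eq_splitSlash (path.toList.map pvTranslateA).flatten
  cases hps : splitSlash (path.toList.map pvTranslateA).flatten with
  | nil => exact absurd hps (splitSlash_ne_nil _)
  | cons p ps =>
    have hcap := (capJoin_splitSlash _ p ps hps).1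
    rw [hs, hps]
    have : ((((p :: ps).filter (fun p => p ≠ [])).map pvCapA).flatten : List Char)
        = scanB path.toList true := by
      have : capJoin (p :: ps) = scanB path.toList true := by
        rw [capJoin_cons, hcap, scanG_translate]
      simpa [capJoin] using this
    rw [this]
    simp

-- ===== VERDICT (by name: the statement is the Claim_ definition above) =====
theorem path_to_class_name_spec : Claim_equal_path_to_class_name := by
  intro path _
  unfold Spec_path_to_class_name
  exact ports_agree path
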